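-- pv_equiv track=rewrite | github.com/disulfidebond/cDNA_to_gDNA | preprocessing/seqC_workflow.py | parseFastaIntoExons
-- ===== SOURCE A (Python) =====
-- def parseFastaIntoExons(l):
--     parsedFastaList = []
--     currentSeq = l[0][0].split(':')
--     currentSeq = ':'.join(currentSeq[:-1])
--     seqTuple = []
--     for i in l:
--         checkSeq = i[0].split(':')
--         checkSeq = ':'.join(checkSeq[:-1])
--         if checkSeq != currentSeq:
--             parsedFastaList.append((currentSeq, seqTuple))
--             currentSeq = checkSeq
--             seqTuple = []
--             h = i[0].split(':')[-1]
--             seqTuple.append((h, i[1]))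
--         else:
--             h = i[0].split(':')[-1]
--             seqTuple.append((h, i[1]))
--     parsedFastaList.append((currentSeq, seqTuple))
--     return parsedFastaList
-- ===== SOURCE B (Python) =====
-- def _key(name):
--     parts = name.split(':')
--     return ':'.join(parts[:-1])
--
--
-- def _last(name):
--     return name.split(':')[-1]
--
--
-- def parseFastaIntoExons(l):
--     # Recursive run-splitting: peel off the leading run of entries sharing
--     # the head's prefix key, then recurse on the remainder.
--     if not l:
--         return []
--     k = _key(l[0][0])
--     n = 1
--     while n < len(l) and _key(l[n][0]) == k:
--         n += 1
--     grp = [(_last(x[0]), x[1]) for x in l[:n]]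
--     return [(k, grp)] + parseFastaIntoExons(l[n:])
-- ===== Notes on version B (the rewrite author's own statement) =====
-- stated objective: alternative
-- what changed: B replaces A's single accumulator loop (flush-on-key-change with mutable currentSeq/seqTuple state) by structural recursion that peels off one maximal run of consecutive equal-key entries at a time.
import Mathlib
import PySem

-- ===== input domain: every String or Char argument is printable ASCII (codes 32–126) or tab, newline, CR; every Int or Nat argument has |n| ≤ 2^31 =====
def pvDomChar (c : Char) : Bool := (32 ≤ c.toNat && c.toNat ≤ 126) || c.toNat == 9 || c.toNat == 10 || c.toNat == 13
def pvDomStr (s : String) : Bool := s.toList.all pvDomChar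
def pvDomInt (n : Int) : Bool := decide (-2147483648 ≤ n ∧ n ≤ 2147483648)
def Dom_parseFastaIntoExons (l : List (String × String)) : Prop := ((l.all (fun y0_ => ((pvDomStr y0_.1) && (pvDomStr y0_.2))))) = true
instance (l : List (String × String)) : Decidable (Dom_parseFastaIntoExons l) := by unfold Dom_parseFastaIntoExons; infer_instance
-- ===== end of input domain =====

-- B replaces A's flush-on-key-change accumulator loop by structural recursion peeling off one
-- maximal run of consecutive equal-key entries at a time (alternative decomposition, same cost).

-- ===== PORT A =====
-- ':'.join(s.split(':')[:-1])  (split? with separator ":" ≠ "" is always some; getD default unused)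
def pvKey (s : String) : String :=
  PySem.Str.join ":" (PySem.List.slice ((PySem.Str.split? s ":").getD []) none (some (-1)))

-- s.split(':')[-1]  (split never returns an empty list, so the getD default is never used)
def pvLast (s : String) : String :=
  (PySem.List.pyGet? ((PySem.Str.split? s ":").getD []) (-1)).getD ""

-- the body of A's for-loop, acting on the state (parsedFastaList, currentSeq, seqTuple)
def pvStep (st : List (String × List (String × String)) × String × List (String × String))
    (i : String × String) : List (String × List (String × String)) × String × List (String × String) :=
  let checkSeq := pvKey i.1
  if checkSeq ≠ st.2.1 then
    (st.1 ++ [(st.2.1, st.2.2)], checkSeq, [(pvLast i.1, i.2)])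
  else
    (st.1, st.2.1, st.2.2 ++ [(pvLast i.1, i.2)])

def parseFastaIntoExons (l : List (String × String)) : List (String × (List (String × String))) :=
  -- currentSeq = ':'.join(l[0][0].split(':')[:-1])   (l[0] guarded by Pre_: l ≠ [])
  let currentSeq0 := pvKey ((PySem.List.pyGet? l 0).getD ("", "")).1
  let fin := l.foldl pvStep ([], currentSeq0, [])
  fin.1 ++ [(fin.2.1, fin.2.2)]

-- ===== PORT B =====
def parseFastaIntoExons_alt : List (String × String) → List (String × (List (String × String)))
  | [] => []
  | x :: rest =>
    let k := pvKey x.1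
    let run := rest.takeWhile (fun y => pvKey y.1 == k)
    (k, (x :: run).map (fun y => (pvLast y.1, y.2))) ::
      parseFastaIntoExons_alt (rest.dropWhile (fun y => pvKey y.1 == k))
  termination_by l => l.length
  decreasing_by
    simpa using Nat.lt_succ_of_le (List.length_dropWhile_le _ _)

-- ===== PRECONDITION & SPEC =====
-- A reads l[0] before the loop, so it raises IndexError on the empty list; Pre_ excludes exactly that.
def Pre_parseFastaIntoExons (l : List (String × String)) : Prop := l ≠ []
instance (l : List (String × String)) : Decidable (Pre_parseFastaIntoExons l) := by
  unfold Pre_parseFastaIntoExons; infer_instance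
def pvWitness_parseFastaIntoExons : (List (String × String)) := [("chr1:1", "ACGT"), ("chr1:2", "GG")]

def Spec_parseFastaIntoExons (l : List (String × String)) (out : List (String × (List (String × String)))) : Prop := out = parseFastaIntoExons_alt l
instance (l : List (String × String)) (out : List (String × (List (String × String)))) : Decidable (Spec_parseFastaIntoExons l out) := by unfold Spec_parseFastaIntoExons; infer_instance

-- ===== CLAIM (what is proved, stated in full; the proofs are below) =====
def Claim_equal_parseFastaIntoExons : Prop := ∀ (l : List (String × String)), Dom_parseFastaIntoExons l → Pre_parseFastaIntoExons l → Spec_parseFastaIntoExons l (parseFastaIntoExons l)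

-- ===== LEMMAS AND PROOFS =====

-- the tail of A's computation, with the accumulator abstracted away
def pvGo (cur : String) (seq : List (String × String)) :
    List (String × String) → List (String × List (String × String))
  | [] => [(cur, seq)]
  | x :: xs =>
    if pvKey x.1 = cur then pvGo cur (seq ++ [(pvLast x.1, x.2)]) xs
    else (cur, seq) :: pvGo (pvKey x.1) [(pvLast x.1, x.2)] xs

theorem pvFoldl_eq_go (l : List (String × String)) :
    ∀ (acc : List (String × List (String × String))) (cur : String) (seq : List (String × String)),
      (l.foldl pvStep (acc, cur, seq)).1 ++ [((l.foldl pvStep (acc, cur, seq)).2.1, (l.foldl pvStep (acc, cur, seq)).2.2)]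
        = acc ++ pvGo cur seq l := by
  induction l with
  | nil => intro acc cur seq; simp [pvGo]
  | cons x xs ih =>
    intro acc cur seq
    by_cases h : pvKey x.1 = cur
    · simp [List.foldl_cons, pvStep, h, pvGo, ih]
    · simp [List.foldl_cons, pvStep, h, pvGo, ih]

theorem pvGo_eq_alt (xs : List (String × String)) :
    ∀ (cur : String) (seq : List (String × String)),
      pvGo cur seq xs
        = (cur, seq ++ (xs.takeWhile (fun y => pvKey y.1 == cur)).map (fun y => (pvLast y.1, y.2))) ::
            parseFastaIntoExons_alt (xs.dropWhile (fun y => pvKey y.1 == cur)) := by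
  induction xs with
  | nil => intro cur seq; simp [pvGo, parseFastaIntoExons_alt]
  | cons x xs ih =>
    intro cur seq
    by_cases h : pvKey x.1 = cur
    · simp [pvGo, h, ih]
    · simp only [pvGo, h, if_false, List.takeWhile_cons, List.dropWhile_cons, beq_iff_eq]
      rw [parseFastaIntoExons_alt, ih]
      simp

-- ===== VERDICT (by name: the statement is the Claim_ definition above) =====
theorem parseFastaIntoExons_spec : Claim_equal_parseFastaIntoExons := by
  intro l _ hpre
  unfold Spec_parseFastaIntoExons parseFastaIntoExons
  match l, hpre with
  | x :: xs, _ =>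
    show (_ : List _) ++ _ = _
    rw [show (PySem.List.pyGet? (x :: xs) 0).getD ("", "") = x from by simp [pysem]]
    rw [pvFoldl_eq_go, pvGo_eq_alt]
    simp [parseFastaIntoExons_alt]
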